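-- pv_equiv track=rewrite | github.com/SmashingBumpkin/Python | 8/program.py | es8
-- ===== SOURCE A (Python) =====
-- def es8(wordList):
--   output = []
--   for wordA in wordList:
--       for wordB in wordList:
--           if wordA == wordB:
--               continue
--           length= min(len(wordA),len(wordB))
--           for i in range(2,length+1):
--               if wordA[-i::] == wordB[:i:]:
--                   mashup = wordA + wordB[i::]
--                   if mashup not in output:
--                       output.append(mashup)
--   output.sort()
--   return output
-- ===== SOURCE B (Python) =====
-- def es8(wordList):
--     words = list(dict.fromkeys(wordList))
--     prefixes = {}
--     for w in words:
--         for i in range(2, len(w) + 1):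
--             prefixes.setdefault(w[:i], []).append(w)
--     out = set()
--     for a in words:
--         for i in range(2, len(a) + 1):
--             for b in prefixes.get(a[len(a) - i:], []):
--                 if b != a:
--                     out.add(a + b[i:])
--     return sorted(out)
-- ===== Notes on version B (the rewrite author's own statement) =====
-- stated objective: faster
-- what changed: Replaces the all-pairs scan with a dict indexing every word by each of its prefixes (length >= 2), so each word's suffixes are looked up directly, and replaces the linear 'not in output' dedup with a set; sorted(set) at the end.
import Mathlib
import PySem

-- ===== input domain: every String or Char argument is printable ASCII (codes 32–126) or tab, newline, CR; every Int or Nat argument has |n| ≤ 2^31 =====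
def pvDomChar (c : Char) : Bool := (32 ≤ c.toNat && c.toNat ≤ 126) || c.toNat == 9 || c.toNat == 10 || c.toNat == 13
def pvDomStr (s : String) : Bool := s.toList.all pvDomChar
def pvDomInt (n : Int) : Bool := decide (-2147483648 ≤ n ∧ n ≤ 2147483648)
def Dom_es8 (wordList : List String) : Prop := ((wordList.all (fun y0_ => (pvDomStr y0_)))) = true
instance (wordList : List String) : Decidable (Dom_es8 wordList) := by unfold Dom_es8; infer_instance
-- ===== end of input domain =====

-- B replaces A's all-pairs overlap scan by a dict indexing every distinct word under each of its
-- prefixes (length ≥ 2) plus a set for dedup (objective: faster).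

-- ===== PORT A =====
-- innermost loop body: 'if wordA[-i::] == wordB[:i:]: … if mashup not in output: output.append(mashup)'
def es8LoopI (wordA wordB : String) (output : List String) (i : Int) : List String :=
  if PySem.Str.slice wordA (some (-i)) none == PySem.Str.slice wordB none (some i) then
    let mashup := wordA ++ PySem.Str.slice wordB (some i) none
    if output.contains mashup then output else output ++ [mashup]
  else output

-- body of 'for wordB in wordList'
def es8LoopB (wordA : String) (output : List String) (wordB : String) : List String :=
  if wordA == wordB then output
  else
    let length := min (PySem.Str.len wordA) (PySem.Str.len wordB)
    (PySem.List.pyRange 2 (length + 1)).foldl (es8LoopI wordA wordB) output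

def es8 (wordList : List String) : List String :=
  let output := wordList.foldl (fun output wordA => wordList.foldl (es8LoopB wordA) output) []
  PySem.List.sorted output (fun x => x) false

-- ===== PORT B =====
-- prefixes: for w in words: for i in range(2, len(w)+1): prefixes.setdefault(w[:i], []).append(w)
def es8Index (words : List String) : PySem.Dict String (List String) :=
  words.foldl (fun d w =>
    (PySem.List.pyRange 2 (PySem.Str.len w + 1)).foldl
      (fun d i => d.modify (PySem.Str.slice w none (some i)) [] (fun l => l ++ [w])) d)
    PySem.Dict.empty

-- body of 'for i in range(2, len(a)+1)': look the length-i suffix of a up in the index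
def es8LookupI (prefixes : PySem.Dict String (List String)) (a : String)
    (out : PySem.Set String) (i : Int) : PySem.Set String :=
  (prefixes.getD (PySem.Str.slice a (some (PySem.Str.len a - i)) none) []).foldl
    (fun out b => if b != a then PySem.Set.add out (a ++ PySem.Str.slice b (some i) none) else out) out

def es8_alt (wordList : List String) : List String :=
  let words := PySem.List.dedup wordList
  let prefixes := es8Index words
  let out := words.foldl (fun out a =>
    (PySem.List.pyRange 2 (PySem.Str.len a + 1)).foldl (es8LookupI prefixes a) out) PySem.Set.empty
  PySem.List.sorted out (fun x => x) false

-- ===== PRECONDITION & SPEC =====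
def Spec_es8 (wordList : List String) (out : List String) : Prop := out = es8_alt wordList
instance (wordList : List String) (out : List String) : Decidable (Spec_es8 wordList out) := by unfold Spec_es8; infer_instance

-- ===== CLAIM (what is proved, stated in full; the proofs are below) =====
def Claim_equal_es8 : Prop := ∀ (wordList : List String), Dom_es8 wordList → Spec_es8 wordList (es8 wordList)

-- ===== LEMMAS AND PROOFS =====

-- the mashups both programs collect, as a predicate
def MashP (ws : List String) (y : String) : Prop :=
  ∃ a ∈ ws, ∃ b ∈ ws, a ≠ b ∧ ∃ i : Int, 2 ≤ i ∧ i ≤ PySem.Str.len a ∧ i ≤ PySem.Str.len b ∧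
    PySem.Str.slice a (some (-i)) none = PySem.Str.slice b none (some i) ∧
    y = a ++ PySem.Str.slice b (some i) none

theorem mem_foldl_guardAdd {β : Type} (l : List β) (c : β → Bool) (f : β → String)
    (init : List String) (y : String) :
    y ∈ l.foldl (fun out x => if c x then PySem.Set.add out (f x) else out) init ↔
      y ∈ init ∨ ∃ x ∈ l, c x = true ∧ y = f x := by
  induction l generalizing init with
  | nil => simp
  | cons h t ih =>
    simp only [List.foldl_cons, ih, List.mem_cons]
    by_cases hc : c h
    · simp only [hc, if_true, PySem.Set.mem_add]; aesop
    · simp only [hc, if_false, Bool.false_eq_true]; aesop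

theorem foldl_invariant {β σ : Type} (P : σ → Prop) (f : σ → β → σ) (l : List β) (init : σ)
    (h : ∀ s x, P s → P (f s x)) (h0 : P init) : P (l.foldl f init) := by
  induction l generalizing init with
  | nil => exact h0
  | cons x t ih => exact ih _ (h _ _ h0)

theorem nodup_foldl_guardAdd {β : Type} (l : List β) (c : β → Bool) (f : β → String)
    (init : List String) (h0 : init.Nodup) :
    (l.foldl (fun out x => if c x then PySem.Set.add out (f x) else out) init).Nodup := by
  refine foldl_invariant _ _ _ _ ?_ h0
  intro s x hs
  by_cases hc : c x
  · simpa [hc] using PySem.Set.nodup_add s (f x) hs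
  · simpa [hc] using hs

theorem es8LoopI_eq (wordA wordB : String) :
    es8LoopI wordA wordB = fun out i =>
      if PySem.Str.slice wordA (some (-i)) none == PySem.Str.slice wordB none (some i) then
        PySem.Set.add out (wordA ++ PySem.Str.slice wordB (some i) none) else out := by
  funext out i
  simp [es8LoopI, PySem.Set.add]

theorem slice_neg_eq_slice_sub (a : String) (i : Int) (h1 : 0 < i) (h2 : i ≤ PySem.Str.len a) :
    PySem.Str.slice a (some (-i)) none = PySem.Str.slice a (some (PySem.Str.len a - i)) none := by
  apply String.toList_inj.mp
  rw [PySem.Str.toList_slice, PySem.Str.toList_slice, PySem.Chars.slice_eq_listSlice, PySem.Chars.slice_eq_listSlice]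
  rw [PySem.Str.len_eq] at h2 ⊢
  obtain ⟨n, rfl⟩ : ∃ n : Nat, i = (n : Int) := ⟨i.toNat, (Int.toNat_of_nonneg h1.le).symm⟩
  have hn : 0 < n := by exact_mod_cast h1
  have hle : n ≤ a.toList.length := by exact_mod_cast h2
  have : (a.toList.length : Int) - (n : Int) = ((a.toList.length - n : Nat) : Int) := by omega
  rw [this, PySem.List.slice_from_neg_natCast _ _ hn, PySem.List.slice_from_natCast]

theorem key_len_forces (a b : String) (i i' : Int) (h1 : 0 < i) (h2 : i ≤ PySem.Str.len a)
    (h3 : 0 ≤ i') (h4 : i' ≤ PySem.Str.len b)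
    (h : PySem.Str.slice b none (some i') = PySem.Str.slice a (some (PySem.Str.len a - i)) none) :
    i' = i := by
  have h' := congrArg (fun s => s.toList.length) h
  simp only [PySem.Str.toList_slice, PySem.Chars.slice_eq_listSlice] at h'
  rw [PySem.Str.len_eq] at h2 h4 h'
  obtain ⟨n, rfl⟩ : ∃ n : Nat, i = (n : Int) := ⟨i.toNat, (Int.toNat_of_nonneg h1.le).symm⟩
  obtain ⟨n', rfl⟩ : ∃ m : Nat, i' = (m : Int) := ⟨i'.toNat, (Int.toNat_of_nonneg h3).symm⟩
  have hle : n ≤ a.toList.length := by exact_mod_cast h2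
  have hle' : n' ≤ b.toList.length := by exact_mod_cast h4
  have hcast : (a.toList.length : Int) - (n : Int) = ((a.toList.length - n : Nat) : Int) := by omega
  rw [hcast, PySem.List.slice_to_natCast, PySem.List.slice_from_natCast] at h'
  simp only [List.length_take, List.length_drop] at h'
  omega

theorem mem_es8LoopI_fold (wordA wordB : String) (lst : List Int) (init : List String) (y : String) :
    y ∈ lst.foldl (es8LoopI wordA wordB) init ↔
      y ∈ init ∨ ∃ i ∈ lst,
        PySem.Str.slice wordA (some (-i)) none = PySem.Str.slice wordB none (some i) ∧
        y = wordA ++ PySem.Str.slice wordB (some i) none := by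
  rw [es8LoopI_eq, mem_foldl_guardAdd]
  simp only [beq_iff_eq]

theorem mem_es8LoopB_fold (wordA : String) (ws : List String) (init : List String) (y : String) :
    y ∈ ws.foldl (es8LoopB wordA) init ↔
      y ∈ init ∨ ∃ b ∈ ws, wordA ≠ b ∧ ∃ i : Int,
        2 ≤ i ∧ i ≤ PySem.Str.len wordA ∧ i ≤ PySem.Str.len b ∧
        PySem.Str.slice wordA (some (-i)) none = PySem.Str.slice b none (some i) ∧
        y = wordA ++ PySem.Str.slice b (some i) none := by
  induction ws generalizing init with
  | nil => simp
  | cons b t ih =>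
    rw [List.foldl_cons, ih]
    unfold es8LoopB
    by_cases hab : wordA = b
    · subst hab
      simp only [BEq.rfl, if_true, List.mem_cons]
      constructor
      · rintro (h | ⟨b', hb', hne, rest⟩)
        · exact Or.inl h
        · exact Or.inr ⟨b', Or.inr hb', hne, rest⟩
      · rintro (h | ⟨b', hb', hne, rest⟩)
        · exact Or.inl h
        · rcases hb' with rfl | hb'
          · exact absurd rfl hne
          · exact Or.inr ⟨b', hb', hne, rest⟩
    · have hbe : (wordA == b) = false := beq_eq_false_iff_ne.mpr hab
      have hrange : ∀ i : Int, i ∈ PySem.List.pyRange 2 (min (PySem.Str.len wordA) (PySem.Str.len b) + 1) ↔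
          2 ≤ i ∧ i ≤ PySem.Str.len wordA ∧ i ≤ PySem.Str.len b := by
        intro i; rw [PySem.List.mem_pyRange_one]; omega
      simp only [hbe, Bool.false_eq_true, if_false, mem_es8LoopI_fold, hrange, List.mem_cons]
      constructor
      · rintro ((h | ⟨i, ⟨h2, ha, hb⟩, hg, he⟩) | ⟨b', hb', hne, rest⟩)
        · exact Or.inl h
        · exact Or.inr ⟨b, Or.inl rfl, hab, i, h2, ha, hb, hg, he⟩
        · exact Or.inr ⟨b', Or.inr hb', hne, rest⟩
      · rintro (h | ⟨b', hb', hne, i, h2, ha, hb, hg, he⟩)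
        · exact Or.inl (Or.inl h)
        · rcases hb' with rfl | hb'
          · exact Or.inl (Or.inr ⟨i, ⟨h2, ha, hb⟩, hg, he⟩)
          · exact Or.inr ⟨b', hb', hne, i, h2, ha, hb, hg, he⟩

theorem mem_es8_outer (wordList ws : List String) (init : List String) (y : String) :
    y ∈ ws.foldl (fun output wordA => wordList.foldl (es8LoopB wordA) output) init ↔
      y ∈ init ∨ ∃ a ∈ ws, ∃ b ∈ wordList, a ≠ b ∧ ∃ i : Int,
        2 ≤ i ∧ i ≤ PySem.Str.len a ∧ i ≤ PySem.Str.len b ∧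
        PySem.Str.slice a (some (-i)) none = PySem.Str.slice b none (some i) ∧
        y = a ++ PySem.Str.slice b (some i) none := by
  induction ws generalizing init with
  | nil => simp
  | cons a t ih =>
    rw [List.foldl_cons, ih, mem_es8LoopB_fold]
    simp only [List.mem_cons]
    constructor
    · rintro ((h | ⟨b, hb, rest⟩) | ⟨a', ha', rest⟩)
      · exact Or.inl h
      · exact Or.inr ⟨a, Or.inl rfl, b, hb, rest⟩
      · exact Or.inr ⟨a', Or.inr ha', rest⟩
    · rintro (h | ⟨a', ha', rest⟩)
      · exact Or.inl (Or.inl h)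
      · rcases ha' with rfl | ha'
        · exact Or.inl (Or.inr rest)
        · exact Or.inr ⟨a', ha', rest⟩

theorem mem_es8_pre (wordList : List String) (y : String) :
    y ∈ wordList.foldl (fun output wordA => wordList.foldl (es8LoopB wordA) output) [] ↔
      MashP wordList y := by
  rw [mem_es8_outer]
  simp [MashP]

theorem nodup_es8LoopB (wordA : String) (output : List String) (wordB : String)
    (h : output.Nodup) : (es8LoopB wordA output wordB).Nodup := by
  unfold es8LoopB
  split
  · exact h
  · rw [es8LoopI_eq]
    exact nodup_foldl_guardAdd _ _ _ _ h

theorem nodup_es8_pre (wordList : List String) :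
    (wordList.foldl (fun output wordA => wordList.foldl (es8LoopB wordA) output) []).Nodup := by
  refine foldl_invariant _ _ _ _ ?_ List.nodup_nil
  intro s a hs
  exact foldl_invariant _ _ _ _ (fun s b hb => nodup_es8LoopB a s b hb) hs

theorem es8Index_aux (words : List String) (d : PySem.Dict String (List String)) :
    words.foldl (fun d w =>
      (PySem.List.pyRange 2 (PySem.Str.len w + 1)).foldl
        (fun d i => d.modify (PySem.Str.slice w none (some i)) [] (fun l => l ++ [w])) d) d =
    (words.flatMap (fun w => (PySem.List.pyRange 2 (PySem.Str.len w + 1)).map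
        (fun i => (PySem.Str.slice w none (some i), w)))).foldl
      (fun d p => d.modify p.1 [] (fun l => l ++ [p.2])) d := by
  induction words generalizing d with
  | nil => rfl
  | cons w t ih =>
    rw [List.foldl_cons, ih, List.flatMap_cons, List.foldl_append, List.foldl_map]

theorem mem_getD_es8Index (words : List String) (key : String) (b : String) :
    b ∈ (es8Index words).getD key [] ↔
      ∃ w ∈ words, ∃ i : Int, 2 ≤ i ∧ i ≤ PySem.Str.len w ∧
        PySem.Str.slice w none (some i) = key ∧ b = w := by
  unfold es8Index
  rw [es8Index_aux, PySem.Dict.getD_foldl_modify_append, PySem.Dict.getD_empty]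
  simp only [List.nil_append, List.mem_map, List.mem_filter, List.mem_flatMap,
    PySem.List.mem_pyRange_one, beq_iff_eq]
  have hr : ∀ (w : String) (i : Int), (2 ≤ i ∧ i < PySem.Str.len w + 1) ↔ (2 ≤ i ∧ i ≤ PySem.Str.len w) := by
    intro w i; omega
  simp only [hr]
  aesop

theorem mem_es8LookupI_fold (prefixes : PySem.Dict String (List String)) (a : String)
    (lst : List Int) (init : PySem.Set String) (y : String) :
    y ∈ lst.foldl (es8LookupI prefixes a) init ↔
      y ∈ init ∨ ∃ i ∈ lst, ∃ b ∈ prefixes.getD (PySem.Str.slice a (some (PySem.Str.len a - i)) none) [],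
        b ≠ a ∧ y = a ++ PySem.Str.slice b (some i) none := by
  induction lst generalizing init with
  | nil => simp
  | cons i t ih =>
    rw [List.foldl_cons, ih]
    unfold es8LookupI
    rw [mem_foldl_guardAdd]
    simp only [bne_iff_ne, List.mem_cons]
    constructor
    · rintro ((h | ⟨b, hb, hne, he⟩) | ⟨i', hi', b, hb, hne, he⟩)
      · exact Or.inl h
      · exact Or.inr ⟨i, Or.inl rfl, b, hb, hne, he⟩
      · exact Or.inr ⟨i', Or.inr hi', b, hb, hne, he⟩
    · rintro (h | ⟨i', hi', b, hb, hne, he⟩)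
      · exact Or.inl (Or.inl h)
      · rcases hi' with rfl | hi'
        · exact Or.inl (Or.inr ⟨b, hb, hne, he⟩)
        · exact Or.inr ⟨i', hi', b, hb, hne, he⟩

theorem mem_es8_alt_outer (prefixes : PySem.Dict String (List String)) (ws : List String)
    (init : PySem.Set String) (y : String) :
    y ∈ ws.foldl (fun out a =>
        (PySem.List.pyRange 2 (PySem.Str.len a + 1)).foldl (es8LookupI prefixes a) out) init ↔
      y ∈ init ∨ ∃ a ∈ ws, ∃ i : Int, 2 ≤ i ∧ i ≤ PySem.Str.len a ∧
        ∃ b ∈ prefixes.getD (PySem.Str.slice a (some (PySem.Str.len a - i)) none) [],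
          b ≠ a ∧ y = a ++ PySem.Str.slice b (some i) none := by
  induction ws generalizing init with
  | nil => simp
  | cons a t ih =>
    rw [List.foldl_cons, ih, mem_es8LookupI_fold]
    simp only [List.mem_cons, PySem.List.mem_pyRange_one]
    constructor
    · rintro ((h | ⟨i, ⟨h2, hlt⟩, rest⟩) | ⟨a', ha', rest⟩)
      · exact Or.inl h
      · exact Or.inr ⟨a, Or.inl rfl, i, h2, by omega, rest⟩
      · exact Or.inr ⟨a', Or.inr ha', rest⟩
    · rintro (h | ⟨a', ha', i, h2, hle, rest⟩)
      · exact Or.inl (Or.inl h)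
      · rcases ha' with rfl | ha'
        · exact Or.inl (Or.inr ⟨i, ⟨h2, by omega⟩, rest⟩)
        · exact Or.inr ⟨a', ha', i, h2, hle, rest⟩

theorem mem_es8_alt_pre (wordList : List String) (y : String) :
    y ∈ (PySem.List.dedup wordList).foldl (fun out a =>
        (PySem.List.pyRange 2 (PySem.Str.len a + 1)).foldl
          (es8LookupI (es8Index (PySem.List.dedup wordList)) a) out) PySem.Set.empty ↔
      MashP wordList y := by
  rw [mem_es8_alt_outer]
  simp only [PySem.Set.empty, List.not_mem_nil, false_or, MashP, PySem.List.mem_dedup]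
  constructor
  · rintro ⟨a, ha, i, h2, hia, b, hb, hne, he⟩
    rw [mem_getD_es8Index] at hb
    obtain ⟨w, hw, i', h2', hib', hkey, rfl⟩ := hb
    rw [PySem.List.mem_dedup] at hw
    have hi' : i' = i := key_len_forces a b i i' (by omega) hia (by omega) hib' hkey
    subst hi'
    refine ⟨a, ha, b, hw, hne.symm, i', h2, hia, hib', ?_, he⟩
    rw [slice_neg_eq_slice_sub a i' (by omega) hia]
    exact hkey.symm
  · rintro ⟨a, ha, b, hb, hne, i, h2, hia, hib, hg, he⟩
    refine ⟨a, ha, i, h2, hia, b, ?_, hne.symm, he⟩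
    rw [mem_getD_es8Index]
    refine ⟨b, (PySem.List.mem_dedup _ _).mpr hb, i, h2, hib, ?_, rfl⟩
    rw [← hg, slice_neg_eq_slice_sub a i (by omega) hia]

theorem nodup_es8_alt_pre (wordList : List String) :
    ((PySem.List.dedup wordList).foldl (fun out a =>
        (PySem.List.pyRange 2 (PySem.Str.len a + 1)).foldl
          (es8LookupI (es8Index (PySem.List.dedup wordList)) a) out) PySem.Set.empty).Nodup := by
  refine foldl_invariant _ _ _ _ ?_ List.nodup_nil
  intro s a hs
  refine foldl_invariant _ _ _ _ ?_ hs
  intro s i hs'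
  unfold es8LookupI
  exact nodup_foldl_guardAdd _ _ _ _ hs'

-- ===== VERDICT (by name: the statement is the Claim_ definition above) =====
theorem es8_spec : Claim_equal_es8 := by
  intro wordList _
  unfold Spec_es8 es8 es8_alt
  rw [PySem.List.sorted_id_eq_sorted_id_iff_perm,
    List.perm_ext_iff_of_nodup (nodup_es8_pre wordList) (nodup_es8_alt_pre wordList)]
  intro y
  rw [mem_es8_pre, mem_es8_alt_pre]
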